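-- pv_equiv track=rewrite | github.com/jbartolotti/intersubjectfc | src/intersubjectfc/analyses/ispc.py | _build_comparison_sets
-- ===== SOURCE A (Python) =====
-- def _build_comparison_sets(
--     subjects: list[str],
--     groups: dict[str, str],
-- ) -> dict[str, list[str]]:
--     sets: dict[str, list[str]] = {"full": subjects}
--     group_labels = {groups.get(s) for s in subjects if groups.get(s)}
--     for label in sorted(group_labels):
--         sets[label] = [s for s in subjects if groups.get(s) == label]
--     return sets
-- ===== SOURCE B (Python) =====
-- def _build_comparison_sets(
--     subjects: list[str],
--     groups: dict[str, str],
-- ) -> dict[str, list[str]]: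
--     pairs = [(groups[s], s) for s in subjects if groups.get(s)]
--     buckets: dict[str, list[str]] = {}
--     for label, s in pairs:
--         buckets.setdefault(label, []).append(s)
--     sets: dict[str, list[str]] = {"full": subjects}
--     for label in sorted(buckets):
--         sets[label] = buckets[label]
--     return sets
-- ===== Notes on version B (the rewrite author's own statement) =====
-- stated objective: faster
-- what changed: Replaces A's one-filter-scan-of-subjects-per-label (plus a set comprehension) with a single bucketing pass that appends each subject to its label's list once, then emits the buckets in sorted label order.
import Mathlib
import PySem

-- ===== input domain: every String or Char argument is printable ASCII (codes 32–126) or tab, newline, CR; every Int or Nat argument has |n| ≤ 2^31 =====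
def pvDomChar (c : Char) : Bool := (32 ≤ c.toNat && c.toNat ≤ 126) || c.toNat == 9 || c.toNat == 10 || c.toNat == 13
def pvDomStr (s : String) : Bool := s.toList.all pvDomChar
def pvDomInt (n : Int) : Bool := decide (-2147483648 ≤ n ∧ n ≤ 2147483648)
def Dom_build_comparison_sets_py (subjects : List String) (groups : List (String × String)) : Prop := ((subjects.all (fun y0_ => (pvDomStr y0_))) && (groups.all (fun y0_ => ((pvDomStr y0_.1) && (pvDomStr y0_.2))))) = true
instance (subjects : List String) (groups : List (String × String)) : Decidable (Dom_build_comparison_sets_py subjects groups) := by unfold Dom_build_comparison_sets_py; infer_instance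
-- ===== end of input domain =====

-- B replaces A's one-filter-scan-of-subjects-per-label with a single bucketing pass plus a sorted emit (faster: O(n+L log L) vs O(n*L)).

-- ===== PORT A =====
def build_comparison_sets_py (subjects : List String) (groups : List (String × String)) : List (String × List String) :=
  let sets : PySem.Dict String (List String) := (PySem.Dict.empty).insert "full" subjects
  -- {groups.get(s) for s in subjects if groups.get(s)} : falsy = None or ""
  let group_labels : PySem.Set String :=
    PySem.Set.ofList (subjects.filterMap (fun s =>
      match (PySem.Dict.mk groups).get? s with
      | some l => if l = "" then none else some l
      | none => none))
  (List.foldl (fun sets label =>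
      sets.insert label (subjects.filter (fun s => (PySem.Dict.mk groups).get? s == some label)))
    sets (PySem.List.sorted group_labels (fun x => x) false)).items

-- ===== PORT B =====
def build_comparison_sets_py_alt (subjects : List String) (groups : List (String × String)) : List (String × List String) :=
  let pairs : List (String × String) := subjects.filterMap (fun s =>
      match (PySem.Dict.mk groups).get? s with
      | some l => if l = "" then none else some (l, s)
      | none => none)
  let buckets : PySem.Dict String (List String) :=
    List.foldl (fun d p => d.modify p.1 [] (fun x => x ++ [p.2])) PySem.Dict.empty pairs
  let sets : PySem.Dict String (List String) := (PySem.Dict.empty).insert "full" subjects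
  (List.foldl (fun sets label => sets.insert label (buckets.getD label []))
    sets (PySem.List.sorted buckets.keys (fun x => x) false)).items

-- ===== PRECONDITION & SPEC =====
def Spec_build_comparison_sets_py (subjects : List String) (groups : List (String × String)) (out : List (String × List String)) : Prop := out = build_comparison_sets_py_alt subjects groups
instance (subjects : List String) (groups : List (String × String)) (out : List (String × List String)) : Decidable (Spec_build_comparison_sets_py subjects groups out) := by unfold Spec_build_comparison_sets_py; infer_instance

-- ===== CLAIM (what is proved, stated in full; the proofs are below) =====
def Claim_equal_build_comparison_sets_py : Prop := ∀ (subjects : List String) (groups : List (String × String)), Dom_build_comparison_sets_py subjects groups → Spec_build_comparison_sets_py subjects groups (build_comparison_sets_py subjects groups)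

-- ===== LEMMAS AND PROOFS =====

-- B's pair labels are exactly A's set-comprehension labels, in subject order.
theorem pv_map_fst_pairs (subjects : List String) (groups : List (String × String)) :
    (subjects.filterMap (fun s =>
      match (PySem.Dict.mk groups).get? s with
      | some l => if l = "" then none else some (l, s)
      | none => none)).map (fun p => p.1)
    = subjects.filterMap (fun s =>
      match (PySem.Dict.mk groups).get? s with
      | some l => if l = "" then none else some l
      | none => none) := by
  induction subjects with
  | nil => rfl
  | cons s t ih =>
    simp only [List.filterMap_cons]
    cases h : (PySem.Dict.mk groups).get? s with
    | none => simpa using ih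
    | some l =>
      by_cases hl : l = "" <;> simp [hl, ih]

-- for a truthy label, B's bucket equals A's filter of subjects
theorem pv_bucket_eq_filter (subjects : List String) (groups : List (String × String))
    (l : String) (hl : l ≠ "") :
    ((subjects.filterMap (fun s =>
      match (PySem.Dict.mk groups).get? s with
      | some l => if l = "" then none else some (l, s)
      | none => none)).filter (fun p => p.1 == l)).map (fun x => x.2)
    = subjects.filter (fun s => (PySem.Dict.mk groups).get? s == some l) := by
  induction subjects with
  | nil => rfl
  | cons s t ih =>
    simp only [List.filterMap_cons, List.filter_cons]
    cases h : (PySem.Dict.mk groups).get? s with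
    | none => simpa using ih
    | some m =>
      by_cases hm : m = ""
      · subst hm
        have : ¬ ((some "" : Option String) == some l) = true := by
          simp [Ne.symm hl]
        simp [this, ih]
      · by_cases hml : m = l
        · subst hml
          simp [hm, ih]
        · have h1 : ¬ ((m, s).1 == l) = true := by simp [hml]
          have h2 : ¬ ((some m : Option String) == some l) = true := by simp [hml]
          simp [hm, h1, h2, ih]

-- ===== VERDICT (by name: the statement is the Claim_ definition above) =====
theorem build_comparison_sets_py_spec : Claim_equal_build_comparison_sets_py := by
  intro subjects groups _
  unfold Spec_build_comparison_sets_py build_comparison_sets_py build_comparison_sets_py_alt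
  simp only []
  have hkeys :
      (List.foldl (fun d p => d.modify p.1 [] (fun x => x ++ [p.2])) PySem.Dict.empty
        (subjects.filterMap (fun s =>
          match (PySem.Dict.mk groups).get? s with
          | some l => if l = "" then none else some (l, s)
          | none => none))).keys
      = PySem.Set.ofList (subjects.filterMap (fun s =>
          match (PySem.Dict.mk groups).get? s with
          | some l => if l = "" then none else some l
          | none => none)) := by
    rw [PySem.Dict.keys_foldl_modify_key _ (fun p : String × String => p.1) ([] : List String) (fun _ p => fun x => x ++ [p.2])]
    rw [pv_map_fst_pairs]
    simp [PySem.Dict.keys, PySem.Dict.empty, PySem.Set.update_nil_left]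
  rw [hkeys]
  apply congrArg PySem.Dict.items
  apply PySem.List.foldl_congr_mem
  intro acc x hx
  rw [PySem.List.mem_sorted] at hx
  have hmem : x ∈ subjects.filterMap (fun s =>
      match (PySem.Dict.mk groups).get? s with
      | some l => if l = "" then none else some l
      | none => none) := (PySem.Set.mem_ofList _ _).mp hx
  have hne : x ≠ "" := by
    rcases List.mem_filterMap.mp hmem with ⟨s, _, hs⟩
    cases h : (PySem.Dict.mk groups).get? s with
    | none => simp [h] at hs
    | some l =>
      rw [h] at hs
      by_cases hl : l = ""
      · simp [hl] at hs
      · simp [hl] at hs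
        subst hs
        exact hl
  rw [PySem.Dict.getD_foldl_modify_append, PySem.Dict.getD_empty, List.nil_append,
    pv_bucket_eq_filter _ _ _ hne]
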